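-- pv_equiv track=rewrite | github.com/rogdooley/MailTriage | mailtriage/render/md_to_html.py | _replace_pairs
-- ===== SOURCE A (Python) =====
-- def _replace_pairs(s: str, token: str, open_tag: str, close_tag: str) -> str:
--     # Replace paired tokens left-to-right. Good enough for this constrained markdown.
--     out: list[str] = []
--     i = 0
--     on = False
--     tlen = len(token)
--     while i < len(s):
--         if s.startswith(token, i):
--             out.append(open_tag if not on else close_tag)
--             on = not on
--             i += tlen
--             continue
--         out.append(s[i])
--         i += 1
--     if on:
--         # Unbalanced token: fall back by re-inserting the token.
--         return s
--     return "".join(out)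
-- ===== SOURCE B (Python) =====
-- def _replace_pairs(s: str, token: str, open_tag: str, close_tag: str) -> str:
--     # Split once on the token and reassemble, interleaving alternating tags.
--     parts = s.split(token)
--     if (len(parts) - 1) % 2 == 1:
--         # Unbalanced token count: fall back to the original string.
--         return s
--     pieces = [parts[0]]
--     use_open = True
--     for part in parts[1:]:
--         pieces.append(open_tag if use_open else close_tag)
--         pieces.append(part)
--         use_open = not use_open
--     return "".join(pieces)
-- ===== Notes on version B (the rewrite author's own statement) =====
-- stated objective: faster
-- what changed: Replaces A's index-based character-by-character scan with one s.split(token) followed by interleaving the parts with alternating open/close tags (odd/even count from len(parts)-1 gives the unbalanced fallback up front); the C-level split/join removes the per-character Python loop.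
-- outside the precondition, e.g. on _replace_pairs('', '', '<b>', '</b>'): A returns '', B raises ValueError
import Mathlib
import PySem

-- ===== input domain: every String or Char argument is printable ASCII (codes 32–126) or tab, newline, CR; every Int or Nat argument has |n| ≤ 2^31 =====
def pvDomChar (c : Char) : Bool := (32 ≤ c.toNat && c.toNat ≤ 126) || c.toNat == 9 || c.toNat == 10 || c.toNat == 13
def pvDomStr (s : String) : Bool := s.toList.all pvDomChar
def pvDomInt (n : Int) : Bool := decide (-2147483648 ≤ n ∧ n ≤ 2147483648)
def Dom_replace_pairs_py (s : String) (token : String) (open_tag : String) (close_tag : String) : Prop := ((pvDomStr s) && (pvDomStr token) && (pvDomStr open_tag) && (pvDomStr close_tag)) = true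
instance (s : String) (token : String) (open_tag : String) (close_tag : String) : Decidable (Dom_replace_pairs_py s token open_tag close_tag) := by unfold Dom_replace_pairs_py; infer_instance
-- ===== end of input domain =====

-- B replaces A's character-by-character scan by one split on the token plus an
-- interleaving join of the pieces with alternating tags (idiomatic rewrite).

-- ===== PORT A =====
-- A's while loop over index i, as fuel recursion over the remaining suffix of s
-- (each iteration consumes ≥ 1 character when token ≠ "", so fuel |s|+1 suffices;
-- on token = "" the Python loop never terminates — excluded by Pre_).
def pvAGo (t ot ct : List Char) : Nat → List Char → List (List Char) → Bool → List (List Char) × Bool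
  | _, [], out, on => (out, on)
  | 0, _, out, on => (out, on)          -- fuel guard, unreachable when t ≠ []
  | fuel + 1, l@(_ :: rest), out, on =>
      if PySem.Chars.startswith l t then
        pvAGo t ot ct fuel (l.drop t.length) (out ++ [if !on then ot else ct]) (!on)
      else
        pvAGo t ot ct fuel rest (out ++ [[l.headI]]) on

def replace_pairs_py (s : String) (token : String) (open_tag : String) (close_tag : String) : String :=
  let cs := s.toList
  let res := pvAGo token.toList open_tag.toList close_tag.toList (cs.length + 1) cs [] false
  if res.2 then s else String.mk (PySem.Chars.join [] res.1)

-- ===== PORT B =====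
def replace_pairs_py_alt (s : String) (token : String) (open_tag : String) (close_tag : String) : String :=
  if token.toList = [] then s          -- s.split("") raises ValueError in Python; outside Pre_
  else
    let parts := PySem.Chars.splitOn s.toList token.toList
    if (parts.length - 1) % 2 == 1 then s
    else
      let res := parts.tail.foldl
        (fun (st : List (List Char) × Bool) part =>
          (st.1 ++ [if st.2 then open_tag.toList else close_tag.toList] ++ [part], !st.2))
        ([parts.headD []], true)
      String.mk (PySem.Chars.join [] res.1)

-- ===== PRECONDITION & SPEC =====
-- Pre_ excludes only token = "": there B's s.split("") raises ValueError, and A's while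
-- loop never terminates (i += 0) unless s is also empty, where A happens to return "".
def Pre_replace_pairs_py (s : String) (token : String) (open_tag : String) (close_tag : String) : Prop :=
  token ≠ ""
instance (s : String) (token : String) (open_tag : String) (close_tag : String) : Decidable (Pre_replace_pairs_py s token open_tag close_tag) := by unfold Pre_replace_pairs_py; infer_instance

def pvWitness_replace_pairs_py : String × String × String × String := ("a *b* c", "*", "<em>", "</em>")

def Spec_replace_pairs_py (s : String) (token : String) (open_tag : String) (close_tag : String) (out : String) : Prop := out = replace_pairs_py_alt s token open_tag close_tag
instance (s : String) (token : String) (open_tag : String) (close_tag : String) (out : String) : Decidable (Spec_replace_pairs_py s token open_tag close_tag out) := by unfold Spec_replace_pairs_py; infer_instance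

-- ===== CLAIM (what is proved, stated in full; the proofs are below) =====
def Claim_equal_replace_pairs_py : Prop := ∀ (s : String) (token : String) (open_tag : String) (close_tag : String), Dom_replace_pairs_py s token open_tag close_tag → Pre_replace_pairs_py s token open_tag close_tag → Spec_replace_pairs_py s token open_tag close_tag (replace_pairs_py s token open_tag close_tag)

-- ===== LEMMAS AND PROOFS =====

-- tag ++ part ++ tag ++ part … for the parts after the first, toggling bon
def pvWTail (ot ct : List Char) : Bool → List (List Char) → List Char
  | _, [] => []
  | bon, p :: ps => (if bon then ot else ct) ++ p ++ pvWTail ot ct (!bon) ps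

-- full interleaving of a parts list, first tag is ot when on = false
def pvWeave (ot ct : List Char) (on : Bool) : List (List Char) → List Char
  | [] => []
  | p :: ps => p ++ pvWTail ot ct (!on) ps

theorem pvGo_ne_nil (t : List Char) :
    ∀ fuel l cur acc, PySem.Chars.splitOn.go t fuel l cur acc ≠ [] := by
  intro fuel
  induction fuel with
  | zero => intro l cur acc; simp [PySem.Chars.splitOn.go]
  | succ f ih =>
    intro l cur acc
    cases l with
    | nil => simp [PySem.Chars.splitOn.go]
    | cons c rest =>
      rw [PySem.Chars.splitOn.go]
      split
      · exact ih _ _ _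
      · exact ih _ _ _

theorem pvGo_acc (t : List Char) :
    ∀ fuel l cur acc, PySem.Chars.splitOn.go t fuel l cur acc =
      acc.reverse ++ List.modifyHead (cur.reverse ++ ·) (PySem.Chars.splitOn.go t fuel l [] []) := by
  intro fuel
  induction fuel with
  | zero => intro l cur acc; simp [PySem.Chars.splitOn.go]
  | succ f ih =>
    intro l cur acc
    cases l with
    | nil => simp [PySem.Chars.splitOn.go]
    | cons c rest =>
      rw [PySem.Chars.splitOn.go, PySem.Chars.splitOn.go]
      split
      · rw [ih _ [] (cur.reverse :: acc), ih _ [] [List.nil.reverse]]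
        simp
      · rw [ih rest (c :: cur) acc, ih rest [c] []]
        obtain ⟨q, ps, h⟩ := List.exists_cons_of_ne_nil (pvGo_ne_nil t f rest [] [])
        simp [h]

theorem pvAGo_go (t ot ct : List Char) (ht : t ≠ []) :
    ∀ fuel l out on, l.length < fuel →
      (pvAGo t ot ct fuel l out on).1.flatten
          = out.flatten ++ pvWeave ot ct on (PySem.Chars.splitOn.go t fuel l [] [])
        ∧ (pvAGo t ot ct fuel l out on).2
          = (on ^^ decide ((PySem.Chars.splitOn.go t fuel l [] []).length % 2 = 0)) := by
  intro fuel
  induction fuel with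
  | zero => intro l out on h; omega
  | succ f ih =>
    intro l out on h
    cases l with
    | nil => simp [pvAGo, PySem.Chars.splitOn.go, pvWeave, pvWTail]
    | cons c rest =>
      rw [pvAGo, PySem.Chars.splitOn.go]
      by_cases hp : PySem.Chars.startswith (c :: rest) t = true
      · have hpref : t <+: (c :: rest) := (PySem.Chars.startswith_iff _ _).1 hp
        have htl : 1 ≤ t.length := by
          cases t with
          | nil => exact absurd rfl ht
          | cons _ _ => simp
        have hlen : ((c :: rest).drop t.length).length < f := by
          simp only [List.length_drop]
          simp at h ⊢
          omega
        simp only [hp, if_pos, List.isPrefixOf_iff_prefix.2 hpref, if_true]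
        obtain ⟨hfst, hsnd⟩ := ih ((c :: rest).drop t.length) (out ++ [if !on then ot else ct]) (!on) hlen
        rw [pvGo_acc t f _ [] [List.nil.reverse]]
        obtain ⟨q, ps, hq⟩ := List.exists_cons_of_ne_nil
          (pvGo_ne_nil t f ((c :: rest).drop t.length) [] [])
        constructor
        · rw [hfst, hq]
          simp [pvWeave, pvWTail]
        · rw [hsnd, hq]
          simp only [List.reverse_nil, List.modifyHead, List.nil_append, List.reverse_cons,
            List.length_cons, List.length]
          cases on <;> by_cases hpar : (ps.length + 1) % 2 = 0 <;>
            simp [hpar] <;> omega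
      · have hnp : ¬ t.isPrefixOf (c :: rest) = true := by
          simpa [PySem.Chars.startswith] using hp
        simp only [hp, Bool.false_eq_true, if_false, hnp]
        have hlen : rest.length < f := by simp at h; omega
        obtain ⟨hfst, hsnd⟩ := ih rest (out ++ [[(c :: rest).headI]]) on hlen
        rw [pvGo_acc t f rest [c] []]
        obtain ⟨q, ps, hq⟩ := List.exists_cons_of_ne_nil (pvGo_ne_nil t f rest [] [])
        constructor
        · rw [hfst, hq]
          simp [pvWeave]
        · rw [hsnd, hq]
          simp

theorem pvFold_flatten (ot ct : List Char) :
    ∀ (ps : List (List Char)) (pieces : List (List Char)) (bon : Bool),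
      ((ps.foldl (fun (st : List (List Char) × Bool) part =>
          (st.1 ++ [if st.2 then ot else ct] ++ [part], !st.2)) (pieces, bon)).1).flatten
        = pieces.flatten ++ pvWTail ot ct bon ps := by
  intro ps
  induction ps with
  | nil => intro pieces bon; simp [pvWTail]
  | cons p ps ih =>
    intro pieces bon
    simp only [List.foldl_cons, pvWTail, ih]
    simp

theorem pvJoin_nil_flatten (parts : List (List Char)) :
    PySem.Chars.join [] parts = parts.flatten := by
  simp [PySem.Chars.join, List.intercalate]
  induction parts with
  | nil => simp
  | cons p ps ih => cases ps <;> simp_all [List.intersperse]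

-- ===== VERDICT (by name: the statement is the Claim_ definition above) =====
theorem replace_pairs_py_spec : Claim_equal_replace_pairs_py := by
  intro s token open_tag close_tag _hdom hpre
  unfold Spec_replace_pairs_py replace_pairs_py replace_pairs_py_alt
  have ht : token.toList ≠ [] := by
    intro h
    exact hpre (by rw [← String.ofList_toList (s := token), h])
  simp only [ht, if_false]
  obtain ⟨hfst, hsnd⟩ := pvAGo_go token.toList open_tag.toList close_tag.toList ht
    (s.toList.length + 1) s.toList [] false (by omega)
  set parts := PySem.Chars.splitOn.go token.toList (s.toList.length + 1) s.toList [] [] with hparts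
  have hsplit : PySem.Chars.splitOn s.toList token.toList = parts := rfl
  obtain ⟨p0, ps, hq⟩ := List.exists_cons_of_ne_nil
    (pvGo_ne_nil token.toList (s.toList.length + 1) s.toList [] [])
  rw [← hparts] at hq
  by_cases hev : parts.length % 2 = 0
  · -- even number of parts = odd number of tokens: both fall back to s
    have : (pvAGo token.toList open_tag.toList close_tag.toList (s.toList.length + 1)
        s.toList [] false).2 = true := by rw [hsnd]; simp [hev]
    simp only [hsplit, this, if_true]
    have : (parts.length - 1) % 2 == 1 := by
      have : 1 ≤ parts.length := by rw [hq]; simp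
      simp only [beq_iff_eq]; omega
    simp [this]
  · have h2 : (pvAGo token.toList open_tag.toList close_tag.toList (s.toList.length + 1)
        s.toList [] false).2 = false := by rw [hsnd]; simp [hev]
    simp only [hsplit, h2, if_false]
    have hodd : ¬ ((parts.length - 1) % 2 == 1) := by
      have : 1 ≤ parts.length := by rw [hq]; simp
      simp only [beq_iff_eq]; omega
    simp only [hodd, if_false, Bool.false_eq_true]
    rw [pvJoin_nil_flatten, pvJoin_nil_flatten, hfst, hq]
    rw [pvFold_flatten open_tag.toList close_tag.toList]
    simp [pvWeave]
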